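-- pv_equiv track=rewrite | github.com/Indraos/HumorNet | generate_dict.py | sent2word
-- ===== SOURCE A (Python) =====
-- def is_letter(char):
--     #Helper function for word parsing
--     return (char >= 'A' and char <= 'Z') or (char >= 'a' and char <= 'z') or char == "'"
--
-- def sent2word(string):
--     #Convert sentence to list of words
--     out = []
--     last = 0
--     building = False
--     for index,char in enumerate(string):
--         if is_letter(char) and not building:
--             last = index
--             building = True
--         elif (not is_letter(char)) and (not building):
--             out+=char
--         elif (not is_letter(char)) and building:
--             building = False
--             out.append(string[last:index+1])
--
--     if building:
--         out.append(string[last:])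
--
--     return out
-- ===== SOURCE B (Python) =====
-- def is_letter(char):
--     return (char >= 'A' and char <= 'Z') or (char >= 'a' and char <= 'z') or char == "'"
--
-- def sent2word(string):
--     # Span-based tokenizer: scan a maximal letter run (plus one trailing
--     # separator, if any) per step instead of a per-character state machine.
--     out = []
--     i = 0
--     n = len(string)
--     while i < n:
--         if is_letter(string[i]):
--             j = i + 1
--             while j < n and is_letter(string[j]):
--                 j += 1
--             if j < n:
--                 j += 1
--             out.append(string[i:j])
--             i = j
--         else:
--             out.append(string[i])
--             i += 1
--     return out
-- ===== Notes on version B (the rewrite author's own statement) =====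
-- stated objective: faster
-- what changed: Replaced A's per-character state machine (building flag + last index over enumerate) with a span tokenizer that consumes a whole letter run plus its single trailing separator per step.
import Mathlib
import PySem

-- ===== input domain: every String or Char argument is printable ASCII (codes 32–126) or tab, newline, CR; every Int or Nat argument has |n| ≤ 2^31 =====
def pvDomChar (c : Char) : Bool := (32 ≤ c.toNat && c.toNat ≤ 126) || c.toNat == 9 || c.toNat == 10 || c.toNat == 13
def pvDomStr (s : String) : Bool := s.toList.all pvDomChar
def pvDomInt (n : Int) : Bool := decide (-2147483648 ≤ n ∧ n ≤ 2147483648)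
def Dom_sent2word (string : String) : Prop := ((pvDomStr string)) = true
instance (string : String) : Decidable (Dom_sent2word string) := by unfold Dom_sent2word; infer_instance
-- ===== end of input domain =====

-- B replaces A's per-character building/last state machine by a span tokenizer that consumes a
-- whole letter run (plus one trailing separator) per step; a timing run measured it faster.

-- ===== PORT A =====
def isLetterB (c : Char) : Bool :=
  (decide ('A' ≤ c) && decide (c ≤ 'Z')) || (decide ('a' ≤ c) && decide (c ≤ 'z')) || (c == '\'')

def stepA (full : List Char) (st : List String × Int × Bool) (p : Int × Char) : List String × Int × Bool :=
  let (out, last, building) := st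
  let (index, char) := p
  if isLetterB char && !building then (out, index, true)
  else if !isLetterB char && !building then (out ++ [String.ofList [char]], last, building)
  else if !isLetterB char && building then
    (out ++ [String.ofList (PySem.List.slice full (some last) (some (index + 1)))], last, false)
  else (out, last, building)

def sent2word (string : String) : List String :=
  let cs := string.toList
  let r := (PySem.List.enumerate cs 0).foldl (stepA cs) ([], 0, false)
  if r.2.2 then r.1 ++ [String.ofList (PySem.List.slice cs (some r.2.1) none)] else r.1

-- ===== PORT B =====
def goB : List Char → List String
  | [] => []
  | c :: cs =>
    if isLetterB c then
      let w := cs.takeWhile isLetterB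
      match h : cs.dropWhile isLetterB with
      | [] => [String.ofList (c :: w)]
      | d :: ds => String.ofList (c :: (w ++ [d])) :: goB ds
    else String.ofList [c] :: goB cs
termination_by cs => cs.length
decreasing_by
  · have := List.length_dropWhile_le (p := isLetterB) (l := cs)
    rw [h] at this; simp at this ⊢; omega
  · simp

def sent2word_alt (string : String) : List String := goB string.toList

-- ===== PRECONDITION & SPEC =====
def Spec_sent2word (string : String) (out : List String) : Prop := out = sent2word_alt string
instance (string : String) (out : List String) : Decidable (Spec_sent2word string out) := by unfold Spec_sent2word; infer_instance

-- ===== CLAIM (what is proved, stated in full; the proofs are below) =====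
def Claim_equal_sent2word : Prop := ∀ (string : String), Dom_sent2word string → Spec_sent2word string (sent2word string)

-- ===== LEMMAS AND PROOFS =====

-- finalize A's fold state (the trailing `if building` of A)
def finA (full : List Char) (r : List String × Int × Bool) : List String :=
  if r.2.2 then r.1 ++ [String.ofList (PySem.List.slice full (some r.2.1) none)] else r.1

-- Statement of the invariant for A's machine in the non-building state:
-- the remaining characters cs sit in `full` at position s, and the final result is acc ++ goB cs.
def NB (n : Nat) : Prop := ∀ (cs full : List Char) (s : Nat) (acc : List String) (lastv : Int),
  cs.length ≤ n → full.drop s = cs →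
  finA full ((PySem.List.enumerate cs (s : Int)).foldl (stepA full) (acc, lastv, false))
    = acc ++ goB cs

-- In the building state with word-so-far `pre` starting at `last`:
def BD (n : Nat) : Prop := ∀ (cs pre full : List Char) (last s : Nat) (acc : List String),
  cs.length ≤ n → full.drop last = pre ++ cs → pre.length + last = s →
  finA full ((PySem.List.enumerate cs (s : Int)).foldl (stepA full) (acc, (last : Int), true))
    = acc ++ (match cs.dropWhile isLetterB with
        | [] => [String.ofList (pre ++ cs)]
        | d :: ds => String.ofList (pre ++ (cs.takeWhile isLetterB ++ [d])) :: goB ds)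

theorem goB_cons_of_letter (c : Char) (cs : List Char) (hc : isLetterB c = true) :
    goB (c :: cs) = (match cs.dropWhile isLetterB with
      | [] => [String.ofList (c :: cs.takeWhile isLetterB)]
      | d :: ds => String.ofList (c :: (cs.takeWhile isLetterB ++ [d])) :: goB ds) := by
  rw [goB.eq_def]
  simp only [hc, if_true]
  split <;> rename_i heq <;> rw [heq]

theorem main_both : ∀ n : Nat, NB n ∧ BD n := by
  intro n
  induction n with
  | zero =>
    constructor
    · intro cs full s acc lastv hlen hdrop
      have hcs : cs = [] := List.eq_nil_of_length_eq_zero (Nat.le_zero.mp hlen)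
      subst hcs
      simp [PySem.List.enumerate_nil, finA, goB]
    · intro cs pre full last s acc hlen hdrop hslen
      have hcs : cs = [] := List.eq_nil_of_length_eq_zero (Nat.le_zero.mp hlen)
      subst hcs
      simp [PySem.List.enumerate_nil, finA, PySem.List.slice_from_natCast]
      rw [hdrop]
      simp
  | succ n ih =>
    constructor
    · -- NB (n+1)
      intro cs full s acc lastv hlen hdrop
      cases cs with
      | nil => simp [PySem.List.enumerate_nil, finA, goB]
      | cons c cs' =>
        have hlen' : cs'.length ≤ n := by simp at hlen; omega
        rw [PySem.List.enumerate_cons, List.foldl_cons]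
        have hcast : ((s : Int) + 1) = ((s + 1 : Nat) : Int) := by push_cast; ring
        rw [hcast]
        by_cases hc : isLetterB c
        · have hstep : stepA full (acc, lastv, false) ((s : Int), c) = (acc, (s : Int), true) := by
            simp [stepA, hc]
          rw [hstep]
          have h2 := ih.2 cs' [c] full s (s + 1) acc hlen'
            (by simpa using hdrop) (by simp only [List.length_cons, List.length_nil]; omega)
          rw [h2, goB_cons_of_letter c cs' hc]
          have htw := List.takeWhile_append_dropWhile (p := isLetterB) (l := cs')
          cases h' : cs'.dropWhile isLetterB with
          | nil =>
            rw [h'] at htw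
            simp at htw
            rw [List.takeWhile_eq_self_iff.mpr htw]
            simp
          | cons d ds => simp
        · have hstep : stepA full (acc, lastv, false) ((s : Int), c)
              = (acc ++ [String.ofList [c]], lastv, false) := by
            simp [stepA, hc]
          rw [hstep]
          have hdrop' : full.drop (s + 1) = cs' := by
            rw [← List.drop_drop, hdrop]
            rfl
          have h1 := ih.1 cs' full (s + 1) (acc ++ [String.ofList [c]]) lastv hlen' hdrop'
          rw [h1]
          simp [goB, hc]
    · -- BD (n+1)
      intro cs pre full last s acc hlen hdrop hslen
      cases cs with
      | nil =>
        simp [PySem.List.enumerate_nil, finA, PySem.List.slice_from_natCast]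
        rw [hdrop]
        simp
      | cons c cs' =>
        have hlen' : cs'.length ≤ n := by simp at hlen; omega
        rw [PySem.List.enumerate_cons, List.foldl_cons]
        have hcast : ((s : Int) + 1) = ((s + 1 : Nat) : Int) := by push_cast; ring
        rw [hcast]
        by_cases hc : isLetterB c
        · have hstep : stepA full (acc, (last : Int), true) ((s : Int), c)
              = (acc, (last : Int), true) := by
            simp [stepA, hc]
          rw [hstep]
          have h2 := ih.2 cs' (pre ++ [c]) full last (s + 1) acc hlen'
            (by rw [hdrop]; simp) (by simp; omega)
          rw [h2]
          simp only [List.dropWhile_cons, List.takeWhile_cons, hc, if_true]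
          cases h' : cs'.dropWhile isLetterB with
          | nil => simp
          | cons d ds => simp
        · have hslice : PySem.List.slice full (some (last : Int)) (some ((s + 1 : Nat) : Int))
              = pre ++ [c] := by
            rw [PySem.List.slice_natCast, hdrop]
            have h1 : s + 1 - last = pre.length + 1 := by omega
            have h2 : pre ++ c :: cs' = (pre ++ [c]) ++ cs' := by simp
            rw [h1, h2, List.take_left' (by simp)]
          have hstep : stepA full (acc, (last : Int), true) ((s : Int), c)
              = (acc ++ [String.ofList (pre ++ [c])], (last : Int), false) := by
            rw [← hcast] at hslice
            simp [stepA, hc, hslice]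
          rw [hstep]
          have hdrop' : full.drop (s + 1) = cs' := by
            rw [show s + 1 = last + (pre.length + 1) by omega, ← List.drop_drop, hdrop,
              show pre ++ c :: cs' = (pre ++ [c]) ++ cs' by simp,
              List.drop_left' (by simp)]
          have h1 := ih.1 cs' full (s + 1)
            (acc ++ [String.ofList (pre ++ [c])]) (last : Int) hlen' hdrop'
          rw [h1]
          simp [hc]

-- ===== VERDICT (by name: the statement is the Claim_ definition above) =====
theorem sent2word_spec : Claim_equal_sent2word := by
  intro string _
  unfold Spec_sent2word sent2word sent2word_alt
  have h := (main_both string.toList.length).1 string.toList string.toList 0 [] 0 (le_refl _) (by simp)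
  simpa [finA] using h
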